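-- pv_equiv track=rewrite | github.com/hcchen20022002/nlp_model | create_corpus/corpus_features_tool_for_DDI.py | _get_closest_word
-- ===== SOURCE A (Python) =====
-- def _get_closest_word(target = int(), word_list = []):
--     if 0 == len(word_list):
--         return [0, 9999]
--     else:
--         location_list = [ abs(_[1] - target) for _ in word_list ]
--         #shortest_distance = min([ abs(_ - target) for _ in location_list])
--         shortest_distance = min(location_list)
--         return [ word_list[location_list.index(shortest_distance)][0],
--                 shortest_distance ]
-- ===== SOURCE B (Python) =====
-- def _get_closest_word(target = int(), word_list = []):
--     best = [0, 9999]
--     best_dist = None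
--     for w in word_list:
--         d = abs(w[1] - target)
--         if best_dist is None or d < best_dist:
--             best = [w[0], d]
--             best_dist = d
--     return best
-- ===== Notes on version B (the rewrite author's own statement) =====
-- stated objective: simpler
-- what changed: Replaces the three passes (map to a distance list, min, list.index plus a subscript) by one fused loop that tracks the best word and best distance, with strict < preserving the first-match tie-break.
import Mathlib
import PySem

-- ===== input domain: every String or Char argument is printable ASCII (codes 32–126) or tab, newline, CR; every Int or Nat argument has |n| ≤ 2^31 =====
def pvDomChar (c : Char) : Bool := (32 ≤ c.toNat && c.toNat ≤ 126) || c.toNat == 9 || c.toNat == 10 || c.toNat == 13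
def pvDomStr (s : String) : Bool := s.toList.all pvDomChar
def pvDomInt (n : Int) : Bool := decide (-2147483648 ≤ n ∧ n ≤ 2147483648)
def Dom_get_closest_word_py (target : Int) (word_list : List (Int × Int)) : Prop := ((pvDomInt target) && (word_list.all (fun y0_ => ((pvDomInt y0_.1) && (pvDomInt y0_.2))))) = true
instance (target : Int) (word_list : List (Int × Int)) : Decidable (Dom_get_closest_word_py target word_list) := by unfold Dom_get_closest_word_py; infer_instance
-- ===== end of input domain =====

-- B fuses A's three passes (distance map, min, list.index + subscript) into one loop
-- keeping the best word and distance; strict < keeps A's first-match tie-break (objective: simpler).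


-- ===== PORT A =====
def get_closest_word_py (target : Int) (word_list : List (Int × Int)) : List Int :=
  if word_list.length = 0 then [0, 9999]
  else
    let location_list := word_list.map (fun x => |x.2 - target|)
    match PySem.List.min? location_list (fun y => y) with
    | none => []        -- unreachable: min raises only on an empty list
    | some shortest_distance =>
      match PySem.List.index? location_list shortest_distance with
      | none => []      -- unreachable: the minimum is in the list
      | some i =>
        match PySem.List.pyGet? word_list (Int.ofNat i) with
        | none => []    -- unreachable: the index is in range
        | some p => [p.1, shortest_distance]

-- ===== PORT B =====
def pvStepB (target : Int) (st : (List Int) × Option Int) (w : Int × Int) :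
    (List Int) × Option Int :=
  let d := |w.2 - target|
  match st.2 with
  | none => ([w.1, d], some d)
  | some bd => if d < bd then ([w.1, d], some d) else st

def get_closest_word_py_alt (target : Int) (word_list : List (Int × Int)) : List Int :=
  (word_list.foldl (pvStepB target) ([0, 9999], none)).1

-- ===== PRECONDITION & SPEC =====
def Spec_get_closest_word_py (target : Int) (word_list : List (Int × Int)) (out : List Int) : Prop := out = get_closest_word_py_alt target word_list
instance (target : Int) (word_list : List (Int × Int)) (out : List Int) : Decidable (Spec_get_closest_word_py target word_list out) := by unfold Spec_get_closest_word_py; infer_instance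

-- ===== CLAIM (what is proved, stated in full; the proofs are below) =====
def Claim_equal_get_closest_word_py : Prop := ∀ (target : Int) (word_list : List (Int × Int)), Dom_get_closest_word_py target word_list → Spec_get_closest_word_py target word_list (get_closest_word_py target word_list)

-- ===== LEMMAS AND PROOFS =====

-- A on p :: t where p's distance is minimal returns [p.1, |p.2 - target|].
theorem pvA_head (target : Int) (p : Int × Int) (t : List (Int × Int))
    (h : ∀ q ∈ t, |p.2 - target| ≤ |q.2 - target|) :
    get_closest_word_py target (p :: t) = [p.1, |p.2 - target|] := by
  unfold get_closest_word_py
  simp only [List.length_cons, List.map_cons]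
  have hm : PySem.List.min? (|p.2 - target| :: t.map (fun x => |x.2 - target|)) (fun y => y)
      = some (|p.2 - target|) := by
    rcases hsome : PySem.List.min? (|p.2 - target| :: t.map (fun x => |x.2 - target|)) (fun y => y) with _ | m
    · exact absurd ((PySem.List.min?_eq_none_iff _ _).mp hsome) (by simp)
    · have hmem := PySem.List.min?_mem hsome
      have hle : m ≤ |p.2 - target| := by
        have := PySem.List.min?_isMin hsome (|p.2 - target|) (by simp)
        simpa using this
      have hge : |p.2 - target| ≤ m := by
        rcases List.mem_cons.mp hmem with h1 | h1
        · omega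
        · rcases List.mem_map.mp h1 with ⟨q, hq, rfl⟩; exact h q hq
      have : m = |p.2 - target| := le_antisymm hle hge
      rw [hsome, this]
  have hidx : PySem.List.index? (|p.2 - target| :: t.map (fun x => |x.2 - target|)) (|p.2 - target|)
      = some 0 := PySem.List.index?_cons_self _ _
  have hget : PySem.List.pyGet? (p :: t) (Int.ofNat 0) = some p := by
    simp [PySem.List.pyGet?, PySem.List.pyIdx?]
  simp only [hm, hidx, hget]
  simp

-- A on p :: t where some element of t is strictly closer equals A on t.
theorem pvA_tail (target : Int) (p : Int × Int) (t : List (Int × Int))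
    (h : ∃ q ∈ t, |q.2 - target| < |p.2 - target|) :
    get_closest_word_py target (p :: t) = get_closest_word_py target t := by
  obtain ⟨q0, hq0, hlt⟩ := h
  have htne : t ≠ [] := by rintro rfl; exact absurd hq0 (List.not_mem_nil)
  unfold get_closest_word_py
  simp only [List.length_cons, List.map_cons]
  -- the minimum of the whole list
  rcases hsome : PySem.List.min? (|p.2 - target| :: t.map (fun x => |x.2 - target|)) (fun y => y) with _ | m
  · exact absurd ((PySem.List.min?_eq_none_iff _ _).mp hsome) (by simp)
  have hmem := PySem.List.min?_mem hsome
  have hmin : ∀ y ∈ (|p.2 - target| :: t.map (fun x => |x.2 - target|)), m ≤ y := by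
    intro y hy; simpa using PySem.List.min?_isMin hsome y hy
  have hmq0 : m ≤ |q0.2 - target| := hmin _ (by
    exact List.mem_cons_of_mem _ (List.mem_map.mpr ⟨q0, hq0, rfl⟩))
  have hmp : m < |p.2 - target| := lt_of_le_of_lt hmq0 hlt
  have hmemt : m ∈ t.map (fun x => |x.2 - target|) := by
    rcases List.mem_cons.mp hmem with h1 | h1
    · omega
    · exact h1
  -- the tail's minimum is the same m
  have hmt : PySem.List.min? (t.map (fun x => |x.2 - target|)) (fun y => y) = some m := by
    rcases hsome' : PySem.List.min? (t.map (fun x => |x.2 - target|)) (fun y => y) with _ | m'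
    · have := (PySem.List.min?_eq_none_iff _ _).mp hsome'
      rw [this] at hmemt; exact absurd hmemt (List.not_mem_nil)
    · have h1 : m' ≤ m := by simpa using PySem.List.min?_isMin hsome' m hmemt
      have h2 : m ≤ m' := hmin m' (List.mem_cons_of_mem _ (PySem.List.min?_mem hsome'))
      rw [hsome', show m' = m by omega]
  have hne : |p.2 - target| ≠ m := by omega
  have hcons : PySem.List.index? (|p.2 - target| :: t.map (fun x => |x.2 - target|)) m
      = Option.map (fun x => x + 1) (PySem.List.index? (t.map (fun x => |x.2 - target|)) m) :=
    PySem.List.index?_cons_of_ne _ hne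
  rcases hidx : PySem.List.index? (t.map (fun x => |x.2 - target|)) m with _ | i
  · rw [PySem.List.index?_eq_none_iff] at hidx
    exact absurd hmemt hidx
  have hget : PySem.List.pyGet? (p :: t) (Int.ofNat (i + 1)) = PySem.List.pyGet? t (Int.ofNat i) := by
    have h' : (Int.ofNat (i + 1)) = (Int.ofNat i) + 1 := by simp
    rw [h']
    exact PySem.List.pyGet?_cons_succ p t i
  simp only [hsome, hmt, hcons, hidx, Option.map_some, hget]
  have hlen : t.length ≠ 0 := by
    simpa [List.length_eq_zero_iff] using htne
  simp [hlen]

-- B's fold does not move while every remaining distance is ≥ the current best.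
theorem pvB_stay (target : Int) (t : List (Int × Int)) :
    ∀ (ws : List Int) (bd : Int), (∀ q ∈ t, bd ≤ |q.2 - target|) →
    t.foldl (pvStepB target) (ws, some bd) = (ws, some bd) := by
  induction t with
  | nil => intro ws bd _; rfl
  | cons q t ih =>
    intro ws bd h
    have hq : bd ≤ |q.2 - target| := h q (by simp)
    simp only [List.foldl_cons, pvStepB]
    rw [if_neg (by omega)]
    exact ih ws bd (fun r hr => h r (List.mem_cons_of_mem _ hr))

-- Once some remaining distance beats the current best, the start state is irrelevant.
theorem pvB_switch (target : Int) (t : List (Int × Int)) :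
    ∀ (ws : List Int) (bd : Int), (∃ q ∈ t, |q.2 - target| < bd) →
    t.foldl (pvStepB target) (ws, some bd) = t.foldl (pvStepB target) ([0, 9999], none) := by
  induction t with
  | nil => rintro ws bd ⟨q, hq, _⟩; exact absurd hq (List.not_mem_nil)
  | cons q t ih =>
    rintro ws bd ⟨q0, hq0, hlt⟩
    simp only [List.foldl_cons]
    show t.foldl (pvStepB target) (pvStepB target (ws, some bd) q)
        = t.foldl (pvStepB target) (pvStepB target ([0, 9999], none) q)
    by_cases hq : |q.2 - target| < bd
    · simp [pvStepB, hq]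
    · have hq0t : q0 ∈ t := by
        rcases List.mem_cons.mp hq0 with h1 | h1
        · subst h1; omega
        · exact h1
      have h1 : (pvStepB target (ws, some bd) q) = (ws, some bd) := by
        simp [pvStepB, hq]
      have h2 : (pvStepB target ([0, 9999], none) q) = ([q.1, |q.2 - target|], some (|q.2 - target|)) := by
        simp [pvStepB]
      rw [h1, h2, ih ws bd ⟨q0, hq0t, hlt⟩,
        ih [q.1, |q.2 - target|] (|q.2 - target|) ⟨q0, hq0t, by omega⟩]

theorem pvMain (target : Int) (word_list : List (Int × Int)) :
    get_closest_word_py target word_list = get_closest_word_py_alt target word_list := by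
  induction word_list with
  | nil => rfl
  | cons p t ih =>
    by_cases h : ∀ q ∈ t, |p.2 - target| ≤ |q.2 - target|
    · rw [pvA_head target p t h]
      unfold get_closest_word_py_alt
      simp only [List.foldl_cons]
      have hstep : pvStepB target ([0, 9999], none) p
          = ([p.1, |p.2 - target|], some (|p.2 - target|)) := by simp [pvStepB]
      rw [hstep, pvB_stay target t _ _ h]
    · push Not at h
      obtain ⟨q, hq, hlt⟩ := h
      rw [pvA_tail target p t ⟨q, hq, hlt⟩, ih]
      unfold get_closest_word_py_alt
      simp only [List.foldl_cons]
      have hstep : pvStepB target ([0, 9999], none) p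
          = ([p.1, |p.2 - target|], some (|p.2 - target|)) := by simp [pvStepB]
      rw [hstep, pvB_switch target t _ _ ⟨q, hq, hlt⟩]

-- ===== VERDICT (by name: the statement is the Claim_ definition above) =====
theorem get_closest_word_py_spec : Claim_equal_get_closest_word_py := by
  intro target word_list _
  exact pvMain target word_list
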